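-- pv_equiv track=rewrite | github.com/vhpanisa/challengerbuilds | challengerbuilds.py | removeEnchant
-- ===== SOURCE A (Python) =====
-- def removeEnchant(build):
--   new_build = []
--   ninja_e = [1315, 1316, 1338, 1317, 1318, 1319] #3047 Ninja
--   ionia_e = [1330, 1341, 1331, 1332, 1333, 1334] #3158 Ionian
--   mobil_e = [1329, 1328, 1325, 1327, 1326, 1340] #3117 Mobility
--   sorce_e = [1314, 1313, 1312, 1311, 1310, 1337] #3020 Sorcerer
--   swift_e = [1307, 1306, 1309, 1308, 1305, 1336] #3009 Swiftness
--   grave_e = [1301, 1300, 1303, 1302, 1304, 1335] #3006 Greaves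
--   for item in build:
--     if item in ninja_e:
--       aux = 3047
--     elif item in ionia_e:
--       aux = 3158
--     elif item in mobil_e:
--       aux = 3117
--     elif item in sorce_e:
--       aux = 3020
--     elif item in swift_e:
--       aux = 3009
--     elif item in grave_e:
--       aux = 3006
--     elif item == 3363:
--       aux = 3342
--     elif item == 3341:
--       aux = 3364
--     elif item in [3361, 3362]:
--       aux = 3340
--     elif item == 0:
--       continue
--     else:
--       aux = item
--     new_build.append(aux)
--   return new_build
-- ===== SOURCE B (Python) =====
-- # The 42 boot-enchant IDs are laid out arithmetically: 1300+5*g..1304+5*g are the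
-- # five enchants of boots group g, and 1335+g is its sixth; classify by division
-- # instead of membership, with slot 4 (1320-1324 / 1339) unused.
-- _BASES = [3006, 3009, 3020, 3047, None, 3117, 3158]
-- _WARDS = {3363: 3342, 3341: 3364, 3361: 3340, 3362: 3340}
--
-- def removeEnchant(build):
--     out = []
--     for item in build:
--         if item == 0:
--             continue
--         if 1300 <= item <= 1334:
--             base = _BASES[(item - 1300) // 5]
--         elif 1335 <= item <= 1341:
--             base = _BASES[item - 1335]
--         else:
--             base = _WARDS.get(item)
--         out.append(item if base is None else base)
--     return out
-- ===== Notes on version B (the rewrite author's own statement) =====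
-- stated objective: faster
-- what changed: Classifies each item arithmetically -- the boot-enchant IDs form blocks 1300+5g..1304+5g plus single 1335+g, so B indexes a 7-slot base array by (item-1300)//5 (or item-1335) instead of A's chained membership tests over six 6-element lists -- with a 4-entry dict only for the ward IDs.
import Mathlib
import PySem

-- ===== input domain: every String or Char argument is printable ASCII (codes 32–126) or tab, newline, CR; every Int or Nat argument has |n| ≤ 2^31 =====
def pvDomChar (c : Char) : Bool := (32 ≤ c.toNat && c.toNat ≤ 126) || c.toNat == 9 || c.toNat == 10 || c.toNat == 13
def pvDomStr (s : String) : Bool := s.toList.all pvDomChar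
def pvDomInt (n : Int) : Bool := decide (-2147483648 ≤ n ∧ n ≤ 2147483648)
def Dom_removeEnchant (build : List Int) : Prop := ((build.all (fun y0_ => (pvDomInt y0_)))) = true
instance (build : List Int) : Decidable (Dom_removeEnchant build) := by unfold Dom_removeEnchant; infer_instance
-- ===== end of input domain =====

-- B classifies each item arithmetically (the boot-enchant IDs form blocks 1300+5g..1304+5g
-- plus a single 1335+g) instead of A's chained membership tests over six lists: alternative.

-- ===== PORT A =====
def removeEnchant (build : List Int) : List Int :=
  let ninja_e : List Int := [1315, 1316, 1338, 1317, 1318, 1319]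
  let ionia_e : List Int := [1330, 1341, 1331, 1332, 1333, 1334]
  let mobil_e : List Int := [1329, 1328, 1325, 1327, 1326, 1340]
  let sorce_e : List Int := [1314, 1313, 1312, 1311, 1310, 1337]
  let swift_e : List Int := [1307, 1306, 1309, 1308, 1305, 1336]
  let grave_e : List Int := [1301, 1300, 1303, 1302, 1304, 1335]
  build.foldl (fun new_build item =>
    if item ∈ ninja_e then new_build ++ [3047]
    else if item ∈ ionia_e then new_build ++ [3158]
    else if item ∈ mobil_e then new_build ++ [3117]
    else if item ∈ sorce_e then new_build ++ [3020]
    else if item ∈ swift_e then new_build ++ [3009]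
    else if item ∈ grave_e then new_build ++ [3006]
    else if item = 3363 then new_build ++ [3342]
    else if item = 3341 then new_build ++ [3364]
    else if item ∈ ([3361, 3362] : List Int) then new_build ++ [3340]
    else if item = 0 then new_build  -- continue
    else new_build ++ [item]) []

-- ===== PORT B =====
def pvBases : List (Option Int) :=
  [some 3006, some 3009, some 3020, some 3047, none, some 3117, some 3158]
def pvWards : PySem.Dict Int Int :=
  PySem.Dict.mk [(3363, 3342), (3341, 3364), (3361, 3340), (3362, 3340)]

def removeEnchant_alt (build : List Int) : List Int :=
  build.foldl (fun out item =>
    if item = 0 then out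
    else
      let base : Option Int :=
        if 1300 ≤ item ∧ item ≤ 1334 then
          (PySem.List.pyGet? pvBases (PySem.Int.floordiv (item - 1300) 5)).join
        else if 1335 ≤ item ∧ item ≤ 1341 then
          (PySem.List.pyGet? pvBases (item - 1335)).join
        else
          pvWards.get? item
      out ++ [match base with | none => item | some b => b]) []

-- ===== PRECONDITION & SPEC =====
def Spec_removeEnchant (build : List Int) (out : List Int) : Prop := out = removeEnchant_alt build
instance (build : List Int) (out : List Int) : Decidable (Spec_removeEnchant build out) := by unfold Spec_removeEnchant; infer_instance

-- ===== CLAIM (what is proved, stated in full; the proofs are below) =====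
def Claim_equal_removeEnchant : Prop := ∀ (build : List Int), Dom_removeEnchant build → Spec_removeEnchant build (removeEnchant build)

-- ===== LEMMAS AND PROOFS =====

-- A's per-item step, extracted for the proof
def pvStepA (new_build : List Int) (item : Int) : List Int :=
  if item ∈ ([1315, 1316, 1338, 1317, 1318, 1319] : List Int) then new_build ++ [3047]
  else if item ∈ ([1330, 1341, 1331, 1332, 1333, 1334] : List Int) then new_build ++ [3158]
  else if item ∈ ([1329, 1328, 1325, 1327, 1326, 1340] : List Int) then new_build ++ [3117]
  else if item ∈ ([1314, 1313, 1312, 1311, 1310, 1337] : List Int) then new_build ++ [3020]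
  else if item ∈ ([1307, 1306, 1309, 1308, 1305, 1336] : List Int) then new_build ++ [3009]
  else if item ∈ ([1301, 1300, 1303, 1302, 1304, 1335] : List Int) then new_build ++ [3006]
  else if item = 3363 then new_build ++ [3342]
  else if item = 3341 then new_build ++ [3364]
  else if item ∈ ([3361, 3362] : List Int) then new_build ++ [3340]
  else if item = 0 then new_build
  else new_build ++ [item]

-- B's per-item step, extracted for the proof
def pvStepB (out : List Int) (item : Int) : List Int :=
  if item = 0 then out
  else
    let base : Option Int :=
      if 1300 ≤ item ∧ item ≤ 1334 then
        (PySem.List.pyGet? pvBases (PySem.Int.floordiv (item - 1300) 5)).join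
      else if 1335 ≤ item ∧ item ≤ 1341 then
        (PySem.List.pyGet? pvBases (item - 1335)).join
      else
        pvWards.get? item
    out ++ [match base with | none => item | some b => b]

lemma pvStep_eq (acc : List Int) (x : Int) : pvStepA acc x = pvStepB acc x := by
  by_cases h1 : 1300 ≤ x ∧ x ≤ 1334
  · obtain ⟨hl, hr⟩ := h1; interval_cases x <;> rfl
  · by_cases h2 : 1335 ≤ x ∧ x ≤ 1341
    · obtain ⟨hl, hr⟩ := h2; interval_cases x <;> rfl
    · by_cases h0 : x = 0
      · subst h0; rfl
      · by_cases w1 : x = 3363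
        · subst w1; rfl
        · by_cases w2 : x = 3341
          · subst w2; rfl
          · by_cases w3 : x = 3361
            · subst w3; rfl
            · by_cases w4 : x = 3362
              · subst w4; rfl
              · have n1 : ((3363:Int) == x) = false := by simp; omega
                have n2 : ((3341:Int) == x) = false := by simp; omega
                have n3 : ((3361:Int) == x) = false := by simp; omega
                have n4 : ((3362:Int) == x) = false := by simp; omega
                have hw : pvWards.get? x = none := by
                  simp [pvWards, n1, n2, n3, n4, PySem.Dict.get?]
                simp only [pvStepA, pvStepB, hw]
                simp only [List.mem_cons, List.not_mem_nil, or_false]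
                have : ¬ (1300 ≤ x ∧ x ≤ 1334) := h1
                have : ¬ (1335 ≤ x ∧ x ≤ 1341) := h2
                split_ifs <;> first | rfl | omega

lemma pvFold_eq (build acc : List Int) :
    build.foldl pvStepA acc = build.foldl pvStepB acc := by
  induction build generalizing acc with
  | nil => rfl
  | cons x xs ih => rw [List.foldl_cons, List.foldl_cons, pvStep_eq, ih]

-- ===== VERDICT (by name: the statement is the Claim_ definition above) =====
theorem removeEnchant_spec : Claim_equal_removeEnchant := by
  intro build _
  show removeEnchant build = removeEnchant_alt build
  have hA : removeEnchant build = build.foldl pvStepA [] := rfl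
  have hB : removeEnchant_alt build = build.foldl pvStepB [] := rfl
  rw [hA, hB, pvFold_eq]
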